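-- pv_equiv track=rewrite | github.com/Linear27/sts2-rl | src/sts2_rl/train/benchmark_suite.py | _merge_seed_lists
-- ===== SOURCE A (Python) =====
-- from typing import Annotated, Any, Literal, Sequence
--
-- def _merge_seed_lists(seed_lists) -> list[str]:
--     merged: list[str] = []
--     seen: set[str] = set()
--     for seed_list in seed_lists:
--         if not isinstance(seed_list, list):
--             continue
--         for seed in seed_list:
--             normalized = _as_optional_str(seed)
--             if normalized is None or normalized in seen:
--                 continue
--             seen.add(normalized)
--             merged.append(normalized)
--     return sorted(merged)
--
-- def _as_optional_str(value: Any) -> str | None: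
--     if value is None:
--         return None
--     normalized = str(value).strip()
--     return normalized or None
-- ===== SOURCE B (Python) =====
-- def _merge_seed_lists(seed_lists):
--     flat = []
--     for seed_list in seed_lists:
--         if not isinstance(seed_list, list):
--             continue
--         for seed in seed_list:
--             normalized = _as_optional_str(seed)
--             if normalized is not None:
--                 flat.append(normalized)
--     flat.sort()
--     out = []
--     for x in flat:
--         if not out or x != out[-1]:
--             out.append(x)
--     return out
--
-- def _as_optional_str(value):
--     if value is None:
--         return None
--     normalized = str(value).strip()
--     return normalized or None
-- ===== Notes on version B (the rewrite author's own statement) =====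
-- stated objective: alternative
-- what changed: Replaces A's set-based first-occurrence dedup followed by a sort with collecting all normalized strings (duplicates kept), sorting first, then a single adjacent-dedupe pass with no set at all.
import Mathlib
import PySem

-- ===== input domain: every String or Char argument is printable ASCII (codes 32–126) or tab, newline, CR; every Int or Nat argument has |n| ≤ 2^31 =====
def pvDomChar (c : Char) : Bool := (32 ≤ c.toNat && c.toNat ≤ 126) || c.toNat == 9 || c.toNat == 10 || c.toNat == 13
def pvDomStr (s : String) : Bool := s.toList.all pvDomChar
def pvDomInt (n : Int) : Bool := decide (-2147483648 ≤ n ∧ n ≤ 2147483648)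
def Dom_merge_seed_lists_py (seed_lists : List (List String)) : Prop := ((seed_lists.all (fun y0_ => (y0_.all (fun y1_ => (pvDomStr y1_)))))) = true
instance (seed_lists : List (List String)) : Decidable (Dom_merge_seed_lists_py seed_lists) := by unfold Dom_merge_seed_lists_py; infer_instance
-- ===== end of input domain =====

-- B replaces A's set-based dedup-then-sort with sort-first then adjacent dedupe (alternative decomposition; same cost).


-- ===== PORT A =====
-- one (merged, seen) step of A's inner loop body
def msStepA (st : List String × PySem.Set String) (seed : String) :
    List String × PySem.Set String :=
  let normalized := PySem.Str.strip seed
  if normalized = "" ∨ PySem.Set.contains st.2 normalized then st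
  else (st.1 ++ [normalized], PySem.Set.add st.2 normalized)

def merge_seed_lists_py (seed_lists : List (List String)) : List String :=
  -- isinstance(seed_list, list) is always true under the List (List String) typing
  let st := seed_lists.foldl (fun st seed_list => seed_list.foldl msStepA st)
    (([] : List String), (PySem.Set.empty : PySem.Set String))
  PySem.List.sorted st.1 (fun x => x) false

-- ===== PORT B =====
-- 'if not out or x != out[-1]: out.append(x)'
def msStepB (out : List String) (x : String) : List String :=
  match out.getLast? with
  | none => out ++ [x]
  | some y => if x ≠ y then out ++ [x] else out

def merge_seed_lists_py_alt (seed_lists : List (List String)) : List String :=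
  let flat := seed_lists.foldl (fun flat seed_list =>
    seed_list.foldl (fun flat seed =>
      let normalized := PySem.Str.strip seed
      if normalized = "" then flat else flat ++ [normalized]) flat) []
  let s := PySem.List.sorted flat (fun x => x) false
  s.foldl msStepB []

-- ===== PRECONDITION & SPEC =====
def Spec_merge_seed_lists_py (seed_lists : List (List String)) (out : List String) : Prop := out = merge_seed_lists_py_alt seed_lists
instance (seed_lists : List (List String)) (out : List String) : Decidable (Spec_merge_seed_lists_py seed_lists out) := by unfold Spec_merge_seed_lists_py; infer_instance

-- ===== CLAIM (what is proved, stated in full; the proofs are below) =====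
def Claim_equal_merge_seed_lists_py : Prop := ∀ (seed_lists : List (List String)), Dom_merge_seed_lists_py seed_lists → Spec_merge_seed_lists_py seed_lists (merge_seed_lists_py seed_lists)

-- ===== LEMMAS AND PROOFS =====

-- A's inner loop keeps merged = seen and both equal Set.update of the nonempty strips
theorem msStepA_diag (s : List String) (seed : String) :
    msStepA (s, s) seed =
      (let n := PySem.Str.strip seed
       (if n = "" then s else PySem.Set.add s n, if n = "" then s else PySem.Set.add s n)) := by
  simp only [msStepA, PySem.Set.add, PySem.Set.contains]
  split_ifs with h1 h2 h3 <;> simp_all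

theorem inner_diag (sl : List String) (s : List String) :
    sl.foldl msStepA (s, s) =
      (sl.foldl (fun acc seed =>
          let n := PySem.Str.strip seed
          if n = "" then acc else PySem.Set.add acc n) s,
       sl.foldl (fun acc seed =>
          let n := PySem.Str.strip seed
          if n = "" then acc else PySem.Set.add acc n) s) := by
  induction sl generalizing s with
  | nil => rfl
  | cons seed t ih =>
      simp only [List.foldl_cons, msStepA_diag]
      exact ih _

-- B's flat accumulator, as a function of the start state
theorem flatB_inner (sl : List String) (f : List String) :
    sl.foldl (fun flat seed =>
        let n := PySem.Str.strip seed
        if n = "" then flat else flat ++ [n]) f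
      = f ++ ((sl.map PySem.Str.strip).filter (fun n => !(n == ""))) := by
  induction sl generalizing f with
  | nil => simp
  | cons seed t ih =>
      simp only [List.foldl_cons, List.map_cons, List.filter_cons]
      by_cases h : PySem.Str.strip seed = "" <;> simp [h, ih]

-- folding Set.add over the filtered strips = A's inner state transformer
theorem inner_as_update (sl : List String) (s : List String) :
    sl.foldl (fun acc seed =>
        let n := PySem.Str.strip seed
        if n = "" then acc else PySem.Set.add acc n) s
      = ((sl.map PySem.Str.strip).filter (fun n => !(n == ""))).foldl PySem.Set.add s := by
  induction sl generalizing s with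
  | nil => rfl
  | cons seed t ih =>
      simp only [List.foldl_cons, List.map_cons, List.filter_cons]
      by_cases h : PySem.Str.strip seed = "" <;> simp [h, ih]

-- B's adjacent-dedupe fold: strictly increasing output with the expected membership
theorem stepB_fold (ys out : List String)
    (hys : ys.Pairwise (· ≤ ·)) (hout : out.Pairwise (· < ·))
    (hle : ∀ y ∈ ys, ∀ z, out.getLast? = some z → z ≤ y) :
    (ys.foldl msStepB out).Pairwise (· < ·) ∧
      ∀ a, a ∈ ys.foldl msStepB out ↔ a ∈ out ∨ a ∈ ys := by
  induction ys generalizing out with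
  | nil => exact ⟨hout, fun a => by simp⟩
  | cons y t ih =>
      have hyt : ∀ y' ∈ t, y ≤ y' := fun y' h => (List.pairwise_cons.mp hys).1 y' h
      have htp : t.Pairwise (· ≤ ·) := (List.pairwise_cons.mp hys).2
      simp only [List.foldl_cons]
      cases hL : out.getLast? with
      | none =>
          have hnil : out = [] := List.getLast?_eq_none_iff.mp hL
          subst hnil
          have := ih ([y]) htp (by simp) (by
            intro y' hy' z hz
            simp at hz; subst hz; exact hyt y' hy')
          refine ⟨by simpa [msStepB] using this.1, ?_⟩
          intro a
          have h2 := this.2 a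
          simp [msStepB] at h2 ⊢
          tauto
      | some z =>
          have hz_le : ∀ w ∈ out, w ≤ z := by
            intro w hw
            rcases eq_or_ne w z with h | h
            · exact le_of_eq h
            · have : z ∈ out := List.mem_of_getLast? hL
              -- out pairwise <, w before-or z is last: derive w < z from pairwise plus lastness
              -- use: out = init ++ [z]
              rcases List.getLast?_eq_some_iff.mp hL with ⟨init, rfl⟩
              rcases List.mem_append.mp hw with h1 | h1
              · have := (List.pairwise_append.mp hout).2.2 w h1 z (by simp)
                exact le_of_lt this
              · simp at h1; exact le_of_eq h1
          have hzy : z ≤ y := hle y (by simp) z hL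
          by_cases hxy : y = z
          · -- skip branch
            have := ih out htp hout (by
              intro y' hy' w hw
              rw [hL] at hw; injection hw with hw; subst hw
              exact le_trans hzy (hyt y' hy'))
            have hstep : msStepB out y = out := by simp [msStepB, hL, hxy]
            rw [hstep]
            refine ⟨this.1, fun a => ?_⟩
            have h2 := this.2 a
            have hzin : z ∈ out := List.mem_of_getLast? hL
            simp at h2 ⊢
            constructor
            · rintro h; rcases h2.mp h with h | h
              · exact Or.inl h
              · exact Or.inr (Or.inr h)
            · rintro (h | h | h)
              · exact h2.mpr (Or.inl h)
              · subst h; exact h2.mpr (Or.inl (hxy ▸ hzin))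
              · exact h2.mpr (Or.inr h)
          · -- append branch
            have hstep : msStepB out y = out ++ [y] := by simp [msStepB, hL, hxy]
            rw [hstep]
            have hlt : ∀ w ∈ out, w < y :=
              fun w hw => lt_of_le_of_lt (hz_le w hw) (lt_of_le_of_ne hzy (Ne.symm hxy))
            have hout' : (out ++ [y]).Pairwise (· < ·) := by
              rw [List.pairwise_append]
              exact ⟨hout, by simp, by intro w hw y' hy'; simp at hy'; subst hy'; exact hlt w hw⟩
            have := ih (out ++ [y]) htp hout' (by
              intro y' hy' w hw
              rw [List.getLast?_concat] at hw
              injection hw with hw; subst hw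
              exact hyt y' hy')
            refine ⟨this.1, fun a => ?_⟩
            have h2 := this.2 a
            simp at h2 ⊢
            tauto

-- the flat list of nonempty strips
def msFlat (seed_lists : List (List String)) : List String :=
  seed_lists.flatMap (fun sl => (sl.map PySem.Str.strip).filter (fun n => !(n == "")))

-- A's whole loop, as a fold of Set.add over msFlat
theorem A_state (seed_lists : List (List String)) (s : List String) :
    seed_lists.foldl (fun st seed_list => seed_list.foldl msStepA st) (s, s)
      = ((msFlat seed_lists).foldl PySem.Set.add s, (msFlat seed_lists).foldl PySem.Set.add s) := by
  induction seed_lists generalizing s with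
  | nil => rfl
  | cons sl t ih =>
      simp only [List.foldl_cons, inner_diag, inner_as_update, msFlat, List.flatMap_cons,
        List.foldl_append]
      exact ih _

-- B's flat accumulator equals msFlat
theorem B_flat (seed_lists : List (List String)) (f : List String) :
    seed_lists.foldl (fun flat seed_list =>
        seed_list.foldl (fun flat seed =>
          let n := PySem.Str.strip seed
          if n = "" then flat else flat ++ [n]) flat) f = f ++ msFlat seed_lists := by
  induction seed_lists generalizing f with
  | nil => simp [msFlat]
  | cons sl t ih =>
      rw [List.foldl_cons, flatB_inner, ih]
      simp [msFlat]

-- ===== VERDICT (by name: the statement is the Claim_ definition above) =====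
theorem merge_seed_lists_py_spec : Claim_equal_merge_seed_lists_py := by
  intro seed_lists _
  unfold Spec_merge_seed_lists_py merge_seed_lists_py merge_seed_lists_py_alt
  simp only [show (PySem.Set.empty : PySem.Set String) = ([] : List String) from rfl, A_state,
    B_flat, List.nil_append]
  have hofl : (msFlat seed_lists).foldl PySem.Set.add ([] : List String)
      = PySem.Set.ofList (msFlat seed_lists) := (PySem.Set.ofList_eq_foldl _).symm
  rw [hofl]
  have hys : (PySem.List.sorted (msFlat seed_lists) (fun x => x) false).Pairwise (· ≤ ·) :=
    PySem.List.sorted_pairwise _ _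
  have hfold := stepB_fold (PySem.List.sorted (msFlat seed_lists) (fun x => x) false) []
    hys (by simp) (by intro y hy z hz; simp at hz)
  have hlt := hfold.1
  have hnodup : ((PySem.List.sorted (msFlat seed_lists) (fun x => x) false).foldl msStepB []).Nodup :=
    hlt.imp ne_of_lt
  have hperm : ((PySem.List.sorted (msFlat seed_lists) (fun x => x) false).foldl msStepB []).Perm
      (PySem.Set.ofList (msFlat seed_lists)) := by
    rw [List.perm_ext_iff_of_nodup hnodup (PySem.Set.nodup_ofList _)]
    intro a
    rw [hfold.2 a, PySem.Set.mem_ofList, PySem.List.mem_sorted]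
    simp
  exact PySem.List.sorted_eq_of_perm_of_pairwise_lt _ _ _ hperm hlt
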